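-- pv_equiv track=rewrite | github.com/LiamDemb/surf-rag | src/surf_rag/benchmark/extract_nq.py | _reconstruct_text_with_offsets
-- ===== SOURCE A (Python) =====
-- from typing import Any, Dict, List, Optional, Sequence, Tuple
--
-- def _reconstruct_text_with_offsets(
--     token_vals: Sequence[Any], is_html: Sequence[Any]
-- ) -> Tuple[str, Dict[int, Tuple[int, int]], Dict[int, int], List[Tuple[int, int, int]]]:
--     """
--     Returns:
--       text
--       token_to_char: original_token_idx -> (char_start, char_end) for visible tokens
--       token_to_visible_pos: original_token_idx -> position among visible tokens
--       visible_tokens: list of (original_idx, char_start, char_end)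
--     """
--     n = min(len(token_vals), len(is_html))
--     pieces: List[str] = []
--     token_to_char: Dict[int, Tuple[int, int]] = {}
--     token_to_visible_pos: Dict[int, int] = {}
--     visible_tokens: List[Tuple[int, int, int]] = []
--     char_pos = 0
--     visible_pos = 0
--     for i in range(n):
--         if bool(is_html[i]):
--             continue
--         token_text = str(token_vals[i]).strip()
--         if not token_text:
--             continue
--         if pieces:
--             pieces.append(" ")
--             char_pos += 1
--         start = char_pos
--         pieces.append(token_text)
--         char_pos += len(token_text)
--         end = char_pos
--         token_to_char[i] = (start, end)
--         token_to_visible_pos[i] = visible_pos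
--         visible_tokens.append((i, start, end))
--         visible_pos += 1
--     return ("".join(pieces), token_to_char, token_to_visible_pos, visible_tokens)
-- ===== SOURCE B (Python) =====
-- def _reconstruct_text_with_offsets(token_vals, is_html):
--     # Declarative pipeline: filter into (idx, text) pairs, closed-form start
--     # offsets as prefix sums of (len+1), and comprehensions for all outputs;
--     # no running char_pos/visible_pos state.
--     visible = [(i, t)
--                for i, (tok, h) in enumerate(zip(token_vals, is_html))
--                if not bool(h) and (t := str(tok).strip())]
--     texts = [t for _, t in visible]
--     # start of visible token k = k separator spaces + total length of earlier tokens
--     starts = _prefix_sums(len(t) + 1 for t in texts)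
--     spans = [(i, s, s + len(t)) for (i, t), s in zip(visible, starts)]
--     return (" ".join(texts),
--             {i: (s, e) for i, s, e in spans},
--             {i: k for k, (i, _) in enumerate(visible)},
--             spans)
--
-- def _prefix_sums(xs):
--     out = [0]
--     for x in xs:
--         out.append(out[-1] + x)
--     return out
-- ===== Notes on version B (the rewrite author's own statement) =====
-- stated objective: alternative
-- what changed: Replaces A's single stateful loop (running char_pos/visible_pos with interleaved separator pieces and three outputs built per iteration) with a declarative pipeline: a filter comprehension collecting (idx, stripped_text), closed-form start offsets computed as prefix sums of len(t)+1, and comprehensions/zip deriving text, both dicts and the span list from those prefix sums.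
import Mathlib
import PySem

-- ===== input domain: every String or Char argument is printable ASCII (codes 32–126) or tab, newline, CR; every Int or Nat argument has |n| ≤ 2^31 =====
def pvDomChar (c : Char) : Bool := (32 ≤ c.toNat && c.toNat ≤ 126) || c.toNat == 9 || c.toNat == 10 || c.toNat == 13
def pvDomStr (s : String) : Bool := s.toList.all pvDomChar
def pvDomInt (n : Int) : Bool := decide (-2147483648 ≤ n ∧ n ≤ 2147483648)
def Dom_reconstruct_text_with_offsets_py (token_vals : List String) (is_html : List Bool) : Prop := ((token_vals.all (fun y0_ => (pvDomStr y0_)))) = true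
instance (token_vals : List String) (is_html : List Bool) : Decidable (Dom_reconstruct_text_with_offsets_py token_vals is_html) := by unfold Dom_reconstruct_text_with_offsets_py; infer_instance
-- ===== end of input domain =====

-- B replaces A's stateful fused loop by a declarative pipeline (filter, closed-form prefix-sum start offsets, comprehensions); same cost, return values proved equal.

-- ===== PORT A =====
def reconstruct_text_with_offsets_py (token_vals : List String) (is_html : List Bool) : String × (List (Int × Int × Int)) × (List (Int × Int)) × (List (Int × Int × Int)) :=
  let n : Int := min (token_vals.length : Int) (is_html.length : Int)
  let st :=
    (PySem.List.pyRange 0 n 1).foldl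
      (fun (st : List String × PySem.Dict Int (Int × Int) × PySem.Dict Int Int × List (Int × Int × Int) × Int × Int) i =>
        let (pieces, token_to_char, token_to_visible_pos, visible_tokens, char_pos, visible_pos) := st
        if PySem.List.pyGetD is_html i false then st
        else
          let token_text := PySem.Str.strip (PySem.List.pyGetD token_vals i "")
          if token_text = "" then st
          else
            let pc := if pieces ≠ [] then (pieces ++ [" "], char_pos + 1) else (pieces, char_pos)
            let start := pc.2
            let char_pos' := pc.2 + PySem.Str.len token_text
            (pc.1 ++ [token_text], token_to_char.insert i (start, char_pos'),
             token_to_visible_pos.insert i visible_pos,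
             visible_tokens ++ [(i, start, char_pos')], char_pos', visible_pos + 1))
      ([], PySem.Dict.empty, PySem.Dict.empty, [], 0, 0)
  (PySem.Str.join "" st.1, st.2.1.items, st.2.2.1.items, st.2.2.2.1)

-- ===== PORT B =====
-- helper _prefix_sums: running-total list starting at 0 (port of Source B's loop with out[-1])
def pvPrefixSums (xs : List Int) : List Int :=
  xs.foldl (fun out x => out ++ [PySem.List.pyGetD out (-1) 0 + x]) [0]

def reconstruct_text_with_offsets_py_alt (token_vals : List String) (is_html : List Bool) : String × (List (Int × Int × Int)) × (List (Int × Int)) × (List (Int × Int × Int)) :=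
  -- filter comprehension: visible tokens as (original index, stripped text)
  let visible : List (Int × String) :=
    (PySem.List.enumerate (token_vals.zip is_html)).filterMap
      (fun p =>
        if p.2.2 then none
        else
          let t := PySem.Str.strip p.2.1
          if t = "" then none else some (p.1, t))
  let texts := visible.map (·.2)
  -- closed-form start offsets: prefix sums of (len + 1)
  let starts := pvPrefixSums (texts.map (fun t => PySem.Str.len t + 1))
  let spans := (visible.zip starts).map (fun q => (q.1.1, q.2, q.2 + PySem.Str.len q.1.2))
  let token_to_char := spans.foldl (fun d q => d.insert q.1 (q.2.1, q.2.2)) (PySem.Dict.empty : PySem.Dict Int (Int × Int))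
  let token_to_visible_pos := (PySem.List.enumerate visible).foldl (fun d q => d.insert q.2.1 q.1) (PySem.Dict.empty : PySem.Dict Int Int)
  (PySem.Str.join " " texts, token_to_char.items, token_to_visible_pos.items, spans)

-- ===== PRECONDITION & SPEC =====
def Spec_reconstruct_text_with_offsets_py (token_vals : List String) (is_html : List Bool) (out : String × (List (Int × Int × Int)) × (List (Int × Int)) × (List (Int × Int × Int))) : Prop := out = reconstruct_text_with_offsets_py_alt token_vals is_html
instance (token_vals : List String) (is_html : List Bool) (out : String × (List (Int × Int × Int)) × (List (Int × Int)) × (List (Int × Int × Int))) : Decidable (Spec_reconstruct_text_with_offsets_py token_vals is_html out) := by unfold Spec_reconstruct_text_with_offsets_py; infer_instance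

-- ===== CLAIM (what is proved, stated in full; the proofs are below) =====
def Claim_equal_reconstruct_text_with_offsets_py : Prop := ∀ (token_vals : List String) (is_html : List Bool), Dom_reconstruct_text_with_offsets_py token_vals is_html → Spec_reconstruct_text_with_offsets_py token_vals is_html (reconstruct_text_with_offsets_py token_vals is_html)

-- ===== LEMMAS AND PROOFS =====

-- A's per-visible-token core step (state: pieces, token_to_char, token_to_visible_pos, visible_tokens, char_pos, visible_pos)
def pvStepCore (st : List String × PySem.Dict Int (Int × Int) × PySem.Dict Int Int × List (Int × Int × Int) × Int × Int)
    (x : Int × String) : List String × PySem.Dict Int (Int × Int) × PySem.Dict Int Int × List (Int × Int × Int) × Int × Int :=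
  let (pieces, d1, d2, vl, cp, vp) := st
  let pc := if pieces ≠ [] then (pieces ++ [" "], cp + 1) else (pieces, cp)
  let cp' := pc.2 + PySem.Str.len x.2
  (pc.1 ++ [x.2], d1.insert x.1 (pc.2, cp'), d2.insert x.1 vp, vl ++ [(x.1, pc.2, cp')], cp', vp + 1)

-- B's filter function
def pvFilt (p : Int × String × Bool) : Option (Int × String) :=
  if p.2.2 then none
  else
    let t := PySem.Str.strip p.2.1
    if t = "" then none else some (p.1, t)

-- the pieces list A accumulates: the texts with a " " piece before each non-first one
def pvSep : List String → Bool → List String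
  | [], _ => []
  | t :: r, first => (if first then [t] else [" ", t]) ++ pvSep r false

def pvSepC : List (List Char) → Bool → List (List Char)
  | [], _ => []
  | t :: r, first => (if first then [t] else [[' '], t]) ++ pvSepC r false

theorem pvSep_map (ts : List String) (first : Bool) :
    (pvSep ts first).map String.toList = pvSepC (ts.map String.toList) first := by
  induction ts generalizing first with
  | nil => rfl
  | cons t r ih => cases first <;> simp [pvSep, pvSepC, ih]

theorem pvJoinC_aux (cs : List (List Char)) (a : List Char) :
    PySem.Chars.join [] (a :: pvSepC cs false) = PySem.Chars.join [' '] (a :: cs) := by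
  induction cs generalizing a with
  | nil => rfl
  | cons b r ih =>
    have h1 := PySem.Chars.join_cons_cons [] a [' '] (b :: pvSepC r false)
    have h2 := PySem.Chars.join_cons_cons [] [' '] b (pvSepC r false)
    have h3 := PySem.Chars.join_cons_cons [' '] a b r
    simp only [pvSepC, Bool.false_eq_true, if_false, List.cons_append, List.nil_append,
      h1, h2, ih b, h3]
    simp

theorem pvJoin_eq (ts : List String) :
    PySem.Str.join "" (pvSep ts true) = PySem.Str.join " " ts := by
  apply String.toList_inj.mp
  rw [PySem.Str.toList_join, PySem.Str.toList_join, pvSep_map]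
  cases h : ts.map String.toList with
  | nil => rfl
  | cons a r =>
    have : (" " : String).toList = [' '] := rfl
    simp only [this]
    show PySem.Chars.join [] (pvSepC (a :: r) true) = _
    simp only [pvSepC]
    simpa using pvJoinC_aux r a

-- the helper _prefix_sums computes a scanl
theorem pvPrefixSums_aux (xs : List Int) (pre : List Int) (c : Int) :
    xs.foldl (fun out x => out ++ [PySem.List.pyGetD out (-1) 0 + x]) (pre ++ [c])
      = pre ++ List.scanl (· + ·) c xs := by
  induction xs generalizing pre c with
  | nil => simp [List.scanl]
  | cons x r ih =>
    have hlast : PySem.List.pyGetD (pre ++ [c]) (-1) 0 = c :=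
      PySem.List.pyGetD_neg_one_append_singleton pre c 0
    rw [List.foldl_cons, hlast, ih (pre ++ [c]) (c + x)]
    simp [List.scanl]

theorem pvPrefixSums_eq_scanl (xs : List Int) :
    pvPrefixSums xs = List.scanl (· + ·) 0 xs := by
  have := pvPrefixSums_aux xs [] 0
  simpa [pvPrefixSums] using this

-- the fused pass over the visible list, in closed form: separator-interleaved pieces,
-- spans keyed by scanl prefix sums, visible positions from enumerate
theorem pvCore_closed (l : List (Int × String)) (s : Nat) (pieces : List String)
    (d1 : PySem.Dict Int (Int × Int)) (d2 : PySem.Dict Int Int)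
    (vl : List (Int × Int × Int)) (cp c : Int)
    (h : if s = 0 then pieces = [] ∧ cp = c else pieces ≠ [] ∧ cp + 1 = c) :
    ∃ cpf vpf,
      List.foldl pvStepCore (pieces, d1, d2, vl, cp, (s : Int)) l =
        (pieces ++ pvSep (l.map (·.2)) (s == 0),
         ((l.zip (List.scanl (· + ·) c (l.map (fun x => PySem.Str.len x.2 + 1)))).map
            (fun q => (q.1.1, q.2, q.2 + PySem.Str.len q.1.2))).foldl
           (fun d q => d.insert q.1 (q.2.1, q.2.2)) d1,
         (PySem.List.enumerate l (s : Int)).foldl (fun d q => d.insert q.2.1 q.1) d2,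
         vl ++ (l.zip (List.scanl (· + ·) c (l.map (fun x => PySem.Str.len x.2 + 1)))).map
            (fun q => (q.1.1, q.2, q.2 + PySem.Str.len q.1.2)),
         cpf, vpf) := by
  induction l generalizing s pieces d1 d2 vl cp c with
  | nil => exact ⟨cp, (s : Int), by simp [pvSep, PySem.List.enumerate_nil]⟩
  | cons x r ih =>
    by_cases hs : s = 0
    · subst hs
      obtain ⟨hp, hcp⟩ := h
      subst hp; subst hcp
      have hstep : pvStepCore ([], d1, d2, vl, cp, ((0 : Nat) : Int)) x
          = ([x.2], d1.insert x.1 (cp, cp + PySem.Str.len x.2), d2.insert x.1 ((0 : Nat) : Int),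
             vl ++ [(x.1, cp, cp + PySem.Str.len x.2)], cp + PySem.Str.len x.2, ((1 : Nat) : Int)) := by
        simp [pvStepCore]
      obtain ⟨cpf, vpf, hr⟩ := ih 1 [x.2] (d1.insert x.1 (cp, cp + PySem.Str.len x.2))
        (d2.insert x.1 ((0 : Nat) : Int)) (vl ++ [(x.1, cp, cp + PySem.Str.len x.2)])
        (cp + PySem.Str.len x.2) (cp + (PySem.Str.len x.2 + 1)) (by constructor <;> simp; omega)
      refine ⟨cpf, vpf, ?_⟩
      rw [List.foldl_cons, hstep, hr]
      simp [pvSep, List.scanl, PySem.List.enumerate_cons]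
    · have hs' : (s == 0) = false := by simp [hs]
      rw [if_neg hs] at h
      obtain ⟨hp, hcp⟩ := h
      have hstep : pvStepCore (pieces, d1, d2, vl, cp, (s : Int)) x
          = (pieces ++ [" "] ++ [x.2], d1.insert x.1 (c, c + PySem.Str.len x.2),
             d2.insert x.1 (s : Int),
             vl ++ [(x.1, c, c + PySem.Str.len x.2)], c + PySem.Str.len x.2,
             ((s + 1 : Nat) : Int)) := by
        simp [pvStepCore, hp, hcp]
      obtain ⟨cpf, vpf, hr⟩ := ih (s + 1) (pieces ++ [" "] ++ [x.2])
        (d1.insert x.1 (c, c + PySem.Str.len x.2)) (d2.insert x.1 (s : Int))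
        (vl ++ [(x.1, c, c + PySem.Str.len x.2)]) (c + PySem.Str.len x.2)
        (c + (PySem.Str.len x.2 + 1)) (by constructor <;> simp; omega)
      refine ⟨cpf, vpf, ?_⟩
      rw [List.foldl_cons, hstep, hr]
      simp [pvSep, hs', List.scanl, PySem.List.enumerate_cons]

-- A's range loop equals the fold of pvStepCore over the filtered enumerate of the zip
theorem pvA_fold_eq (tv : List String) (ih : List Bool)
    (init : List String × PySem.Dict Int (Int × Int) × PySem.Dict Int Int × List (Int × Int × Int) × Int × Int) :
    (PySem.List.pyRange 0 (min (tv.length : Int) (ih.length : Int)) 1).foldl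
      (fun st i =>
        let (pieces, d1, d2, vl, cp, vp) := st
        if PySem.List.pyGetD ih i false then st
        else
          let token_text := PySem.Str.strip (PySem.List.pyGetD tv i "")
          if token_text = "" then st
          else
            let pc := if pieces ≠ [] then (pieces ++ [" "], cp + 1) else (pieces, cp)
            let start := pc.2
            let cp' := pc.2 + PySem.Str.len token_text
            (pc.1 ++ [token_text], d1.insert i (start, cp'), d2.insert i vp,
             vl ++ [(i, start, cp')], cp', vp + 1)) init
    = ((PySem.List.enumerate (tv.zip ih)).filterMap pvFilt).foldl pvStepCore init := by
  have hmin : (min (tv.length : Int) (ih.length : Int)) = PySem.List.len (tv.zip ih) := by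
    simp [PySem.List.len_eq, List.length_zip]
  rw [hmin]
  have key2 : ∀ (init2 : List String × PySem.Dict Int (Int × Int) × PySem.Dict Int Int × List (Int × Int × Int) × Int × Int),
      List.foldl (fun st i => match pvFilt (i, PySem.List.pyGetD (tv.zip ih) i ("", false)) with
          | some b => pvStepCore st b | none => st) init2
        (PySem.List.pyRange 0 (PySem.List.len (tv.zip ih)))
      = List.foldl (fun st p => match pvFilt p with
          | some b => pvStepCore st b | none => st) init2 (PySem.List.enumerate (tv.zip ih)) := by
    intro init2
    rw [PySem.List.enumerate_eq_map_pyRange (tv.zip ih) ("", false), List.foldl_map]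
  rw [PySem.List.foldl_congr_mem _ _
    (fun st i => match pvFilt (i, PySem.List.pyGetD (tv.zip ih) i ("", false)) with
      | some b => pvStepCore st b | none => st) init ?_]
  · rw [key2 init, List.foldl_filterMap]
    exact PySem.List.foldl_congr_mem _ _ _ _ (fun acc x _ => by cases hfx : pvFilt x <;> simp)
  · intro acc i hi
    rw [PySem.List.mem_pyRange_one] at hi
    obtain ⟨h0, hlt⟩ := hi
    obtain ⟨k, rfl⟩ : ∃ k : Nat, i = (k : Int) := ⟨i.toNat, (Int.toNat_of_nonneg h0).symm⟩
    rw [PySem.List.len_eq] at hlt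
    have hk : k < (tv.zip ih).length := by exact_mod_cast hlt
    have hktv : k < tv.length := lt_of_lt_of_le hk (by simp [List.length_zip])
    have hkih : k < ih.length := lt_of_lt_of_le hk (by simp [List.length_zip])
    have hz : PySem.List.pyGetD (tv.zip ih) (k : Int) ("", false) = (tv[k], ih[k]) := by
      rw [PySem.List.pyGetD_natCast, List.getD_eq_getElem _ _ hk, List.getElem_zip]
    have htv : PySem.List.pyGetD tv (k : Int) "" = tv[k] := by
      rw [PySem.List.pyGetD_natCast, List.getD_eq_getElem _ _ hktv]
    have hih : PySem.List.pyGetD ih (k : Int) false = ih[k] := by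
      rw [PySem.List.pyGetD_natCast, List.getD_eq_getElem _ _ hkih]
    obtain ⟨pieces, d1, d2, vl, cp, vp⟩ := acc
    simp only [hz, htv, hih, pvFilt, pvStepCore]
    by_cases hb : ih[k] = true
    · simp [hb]
    · simp only [Bool.not_eq_true] at hb
      simp only [hb, if_neg Bool.false_ne_true]
      by_cases he : PySem.Str.strip tv[k] = ""
      · simp [he]
      · simp [he]

-- ===== VERDICT (by name: the statement is the Claim_ definition above) =====
theorem reconstruct_text_with_offsets_py_spec : Claim_equal_reconstruct_text_with_offsets_py := by
  intro tv ih _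
  unfold Spec_reconstruct_text_with_offsets_py
  unfold reconstruct_text_with_offsets_py reconstruct_text_with_offsets_py_alt
  simp only []
  rw [pvA_fold_eq tv ih]
  obtain ⟨cpf, vpf, hf⟩ := pvCore_closed ((PySem.List.enumerate (tv.zip ih)).filterMap pvFilt) 0 []
    PySem.Dict.empty PySem.Dict.empty [] 0 0 (by simp)
  simp only [Nat.cast_zero] at hf
  rw [hf]
  simp only [List.nil_append, beq_self_eq_true, pvPrefixSums_eq_scanl, List.map_map,
    Function.comp_def, pvFilt]
  rw [pvJoin_eq]
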